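-- pv_equiv track=rewrite | github.com/aleksandra-kim/akula | akula/parameterized_exchanges.py | remove_unused_exchanges
-- ===== SOURCE A (Python) =====
-- from copy import deepcopy
--
-- def remove_unused_exchanges(params_dict):
--     exchanges = {p: v for p, v in params_dict.items() if "__exchange_" in p}
--     params = [p for p, v in params_dict.items() if "__exchange_" not in p]
--     exchanges_copy = deepcopy(exchanges)
--     for exc, dict_ in exchanges_copy.items():
--         flag = False
--         for p in params:
--             if p in dict_['formula']:
--                 flag = True
--                 continue
--         if not flag:
--             exchanges.pop(exc)
--     return exchanges
-- ===== SOURCE B (Python) =====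
-- def remove_unused_exchanges(params_dict):
--     marker = "__exchange_"
--     params = [p for p in params_dict if marker not in p]
--     if not params:
--         return {}
--     has_empty = "" in params
--     # index the param names by first character, built once; at each formula
--     # position only the bucket of that character is tested as a prefix
--     by_first = {}
--     for p in params:
--         if p:
--             by_first.setdefault(p[0], []).append(p)
--
--     def used(formula):
--         if has_empty:
--             return True
--         for i, c in enumerate(formula):
--             for q in by_first.get(c, ()):
--                 if formula.startswith(q, i):
--                     return True
--         return False
--
--     return {k: v for k, v in params_dict.items()
--             if marker in k and used(v['formula'])}
-- ===== Notes on version B (the rewrite author's own statement) =====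
-- stated objective: alternative
-- what changed: B replaces A's per-param substring searches ('p in formula' for every param) with a multi-pattern matcher: a dict indexing the param names by first character is built once, then each formula is scanned position by position testing only the bucket of the current character as prefixes (plus an early return when there are no params and a special case for the empty-string param, which matches everything).
import Mathlib
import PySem

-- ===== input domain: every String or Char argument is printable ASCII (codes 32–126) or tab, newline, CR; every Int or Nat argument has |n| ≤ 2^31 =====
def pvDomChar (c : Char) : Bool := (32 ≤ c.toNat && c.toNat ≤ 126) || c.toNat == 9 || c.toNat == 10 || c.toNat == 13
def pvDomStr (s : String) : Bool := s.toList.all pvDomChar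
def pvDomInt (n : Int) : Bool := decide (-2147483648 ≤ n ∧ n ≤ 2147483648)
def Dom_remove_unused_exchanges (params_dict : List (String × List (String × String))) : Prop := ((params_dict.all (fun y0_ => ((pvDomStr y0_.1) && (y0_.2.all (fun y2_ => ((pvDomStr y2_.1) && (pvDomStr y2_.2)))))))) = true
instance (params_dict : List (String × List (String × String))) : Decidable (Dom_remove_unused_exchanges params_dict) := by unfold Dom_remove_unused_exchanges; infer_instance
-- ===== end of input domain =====

-- B replaces A's per-param substring searches with a first-character bucket index over
-- the param names plus a position-major prefix scan of each formula; objective: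
-- alternative multi-pattern-matching algorithm, same exact result.


-- shared primitive helpers: '"__exchange_" in p' and "dict_['formula']" (first match; inner
-- keys are Nodup under Pre_, so first match = Python's dict lookup)
def pvIsExch (k : String) : Bool := PySem.Str.isIn "__exchange_" k

def pvFormula (d : List (String × String)) : String :=
  ((PySem.Dict.mk d).get? "formula").getD ""

-- ===== PORT A =====
def remove_unused_exchanges (params_dict : List (String × List (String × String))) : List (String × List (String × String)) :=
  -- exchanges = {p: v for p, v in params_dict.items() if "__exchange_" in p}
  let exchanges := params_dict.filter (fun kv => pvIsExch kv.1)
  -- params = [p for p, v in params_dict.items() if "__exchange_" not in p]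
  let params := (params_dict.filter (fun kv => !pvIsExch kv.1)).map Prod.fst
  -- exchanges_copy = deepcopy(exchanges); for exc, dict_ in exchanges_copy.items(): …
  let exchanges_copy := exchanges
  exchanges_copy.foldl (fun exs kv =>
    -- flag = False; for p in params: if p in dict_['formula']: flag = True; continue
    let flag := params.foldl (fun fl p =>
      if PySem.Str.isIn p (pvFormula kv.2) then true else fl) false
    -- if not flag: exchanges.pop(exc)   (pop of a unique key = erase the first match)
    if !flag then exs.eraseP (fun e => e.1 == kv.1) else exs) exchanges

-- ===== PORT B =====
-- B's 'used(formula)': position-major scan; Python's formula.startswith(q, i) for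
-- 0 ≤ i ≤ len(formula) is exactly q.toList.isPrefixOf (formula.toList.drop i)
def pvUsed (by_first : PySem.Dict Char (List String)) (formula : String) : Bool :=
  (PySem.List.enumerate formula.toList).any (fun ic =>
    (by_first.getD ic.2 []).any (fun q =>
      q.toList.isPrefixOf (formula.toList.drop ic.1.toNat)))

def remove_unused_exchanges_alt (params_dict : List (String × List (String × String))) : List (String × List (String × String)) :=
  -- params = [p for p in params_dict if marker not in p]
  let params := (params_dict.filter (fun kv => !pvIsExch kv.1)).map Prod.fst
  -- if not params: return {}
  if params.isEmpty then []
  else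
    -- has_empty = "" in params
    let has_empty := params.contains ""
    -- for p in params: if p: by_first.setdefault(p[0], []).append(p)
    let by_first := params.foldl (fun d q =>
      match q.toList with
      | [] => d
      | c :: _ => d.modify c [] (· ++ [q])) PySem.Dict.empty
    -- {k: v for k, v in params_dict.items() if marker in k and used(v['formula'])}
    params_dict.filter (fun kv =>
      pvIsExch kv.1 && (has_empty || pvUsed by_first (pvFormula kv.2)))

-- ===== PRECONDITION & SPEC =====
-- Pre_ excludes (a) association lists with duplicate outer or inner keys, which do not
-- represent a Python dict, and (b) inputs where A (and B alike) raises KeyError: some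
-- non-exchange param exists and an exchange entry lacks the 'formula' key.
def Pre_remove_unused_exchanges (params_dict : List (String × List (String × String))) : Prop :=
  (params_dict.map Prod.fst).Nodup ∧
  (∀ kv ∈ params_dict, (kv.2.map Prod.fst).Nodup) ∧
  ((∃ kv ∈ params_dict, ¬ pvIsExch kv.1) →
    ∀ kv ∈ params_dict, pvIsExch kv.1 → (PySem.Dict.mk kv.2).contains "formula")
instance (params_dict : List (String × List (String × String))) : Decidable (Pre_remove_unused_exchanges params_dict) := by unfold Pre_remove_unused_exchanges; infer_instance

def pvWitness_remove_unused_exchanges : (List (String × List (String × String))) :=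
  [("a", []), ("x__exchange_1", [("formula", "a+b")])]

def Spec_remove_unused_exchanges (params_dict : List (String × List (String × String))) (out : List (String × List (String × String))) : Prop := out = remove_unused_exchanges_alt params_dict
instance (params_dict : List (String × List (String × String))) (out : List (String × List (String × String))) : Decidable (Spec_remove_unused_exchanges params_dict out) := by unfold Spec_remove_unused_exchanges; infer_instance

-- ===== CLAIM (what is proved, stated in full; the proofs are below) =====
def Claim_equal_remove_unused_exchanges : Prop := ∀ (params_dict : List (String × List (String × String))), Dom_remove_unused_exchanges params_dict → Pre_remove_unused_exchanges params_dict → Spec_remove_unused_exchanges params_dict (remove_unused_exchanges params_dict)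

-- ===== LEMMAS AND PROOFS =====

-- A's inner flag loop is 'any' (no early exit in A, but same value)
theorem pv_flag_eq_any (l : List String) (pred : String → Bool) (b : Bool) :
    l.foldl (fun fl p => if pred p then true else fl) b = (b || l.any pred) := by
  induction l generalizing b with
  | nil => simp
  | cons h t ih =>
      simp only [List.foldl_cons, List.any_cons]
      by_cases hp : pred h = true
      · rw [if_pos hp, ih]; simp [hp]
      · rw [if_neg hp, ih]; simp [hp]

-- pop of a key that occurs at most once = filter
theorem pv_eraseP_eq_filter {α : Type} (l : List (String × α)) (k : String)
    (h : (l.map Prod.fst).Nodup) :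
    l.eraseP (fun e => e.1 == k) = l.filter (fun e => !(e.1 == k)) := by
  induction l with
  | nil => rfl
  | cons a t ih =>
      simp only [List.map_cons, List.nodup_cons] at h
      by_cases ha : a.1 = k
      · subst ha
        rw [List.eraseP_cons_of_pos (by simp), List.filter_cons_of_neg (by simp)]
        symm
        apply List.filter_eq_self.2
        intro e he
        simp only [Bool.not_eq_eq_eq_not, Bool.not_true, beq_eq_false_iff_ne, ne_eq]
        intro hek
        exact h.1 (hek ▸ List.mem_map_of_mem he)
      · rw [List.eraseP_cons_of_neg (by simp [ha]), List.filter_cons_of_pos (by simp [ha]),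
          ih h.2]

-- the pop loop over S applied to an accumulator with Nodup keys is a filter
theorem pv_popLoop_eq_filter {α : Type} (keep : String × α → Bool) :
    ∀ (S A : List (String × α)), (A.map Prod.fst).Nodup →
      S.foldl (fun exs kv => if !keep kv then exs.eraseP (fun e => e.1 == kv.1) else exs) A
        = A.filter (fun kv => S.all (fun e => !(e.1 == kv.1) || keep e)) := by
  intro S
  induction S with
  | nil => intro A _; simp
  | cons e S ih =>
      intro A hA
      simp only [List.foldl_cons]
      by_cases hk : keep e = true
      · rw [if_neg (by simp [hk]), ih A hA]
        apply List.filter_congr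
        intro kv _
        simp [hk]
      · rw [if_pos (by simp [hk]), pv_eraseP_eq_filter A e.1 hA,
          ih _ (by
            apply List.Nodup.sublist _ hA
            exact List.Sublist.map Prod.fst (List.filter_sublist (l := A))),
          List.filter_filter]
        apply List.filter_congr
        intro kv _
        have hk' : keep e = false := Bool.eq_false_iff.mpr hk
        simp only [List.all_cons, hk', Bool.or_false]
        cases hke : (kv.1 == e.1)
        · have he' : (e.1 == kv.1) = false := by
            simpa [BEq.comm] using hke
          simp [he']
        · have he' : (e.1 == kv.1) = true := by
            simpa [BEq.comm] using hke
          simp [he']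

-- A's result as a single filter with the 'any'-predicate (proved exactly as before)
theorem pv_A_eq_filter (pd : List (String × List (String × String)))
    (hN : (pd.map Prod.fst).Nodup) :
    remove_unused_exchanges pd
      = pd.filter (fun kv => pvIsExch kv.1 &&
          ((pd.filter (fun kv => !pvIsExch kv.1)).map Prod.fst).any
            (fun q => PySem.Str.isIn q (pvFormula kv.2))) := by
  unfold remove_unused_exchanges
  set params := (pd.filter (fun kv => !pvIsExch kv.1)).map Prod.fst with hparams
  set keep : String × List (String × String) → Bool :=
    fun kv => params.any (fun q => PySem.Str.isIn q (pvFormula kv.2)) with hkeep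
  have hflag : ∀ kv : String × List (String × String),
      params.foldl (fun fl p => if PySem.Str.isIn p (pvFormula kv.2) then true else fl) false
        = keep kv := by
    intro kv; rw [pv_flag_eq_any]; simp [hkeep]
  have hNodup : ((pd.filter (fun kv => pvIsExch kv.1)).map Prod.fst).Nodup :=
    List.Nodup.sublist (List.Sublist.map Prod.fst (List.filter_sublist (l := pd))) hN
  simp only [hflag]
  rw [pv_popLoop_eq_filter keep _ _ hNodup]
  rw [List.filter_congr (q := keep)
    (fun kv hkv => by
      have hinj := List.inj_on_of_nodup_map hNodup
      cases hkk : keep kv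
      · apply Bool.eq_false_iff.2
        intro hall
        have := (List.all_eq_true.1 hall) kv hkv
        simp [hkk] at this
      · apply List.all_eq_true.2
        intro e he
        cases hek : (e.1 == kv.1)
        · simp
        · have : e = kv := hinj he hkv (by simpa using hek)
          simp [this, hkk])]
  rw [List.filter_filter,
    List.filter_congr (q := fun a => pvIsExch a.1 && keep a) (fun a _ => Bool.and_comm _ _)]

-- the bucket dict built by B's fold: bucket of c = params with first character c
theorem pv_bucket_getD (params : List String) (d : PySem.Dict Char (List String)) (c : Char) :
    ((params.foldl (fun d q =>
        match q.toList with
        | [] => d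
        | c' :: _ => d.modify c' [] (· ++ [q])) d).getD c [])
      = d.getD c [] ++ params.filter (fun q => q.toList.head? == some c) := by
  induction params generalizing d with
  | nil => simp
  | cons q t ih =>
      simp only [List.foldl_cons]
      cases hq : q.toList with
      | nil => rw [ih]; simp [hq]
      | cons c' rest =>
          rw [ih]
          by_cases hcc : c = c'
          · subst hcc
            rw [PySem.Dict.getD_modify_self]
            simp [hq]
          · rw [PySem.Dict.getD_modify_of_ne _ _ _ hcc]
            simp [hq, Ne.symm hcc]

-- the position-major bucket scan computes 'some nonempty param is a substring'
theorem pv_used_eq_any (params : List String) (f : String) :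
    pvUsed (params.foldl (fun d q =>
        match q.toList with
        | [] => d
        | c :: _ => d.modify c [] (· ++ [q])) PySem.Dict.empty) f
      = params.any (fun q => !q.toList.isEmpty && PySem.Str.isIn q f) := by
  unfold pvUsed
  have hbucket : ∀ c : Char,
      ((params.foldl (fun d q =>
          match q.toList with
          | [] => d
          | c' :: _ => d.modify c' [] (· ++ [q])) PySem.Dict.empty).getD c [])
        = params.filter (fun q => q.toList.head? == some c) := by
    intro c; rw [pv_bucket_getD]; simp
  simp only [hbucket]
  rw [Bool.eq_iff_iff]
  simp only [List.any_eq_true, List.mem_filter, PySem.List.mem_enumerate_iff,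
    Bool.and_eq_true, beq_iff_eq, Bool.not_eq_eq_eq_not, PySem.Str.isIn_iff_infix]
  constructor
  · rintro ⟨ic, ⟨k, hk, rfl⟩, q, ⟨hqmem, hhead⟩, hpref⟩
    refine ⟨q, hqmem, ?_, ?_⟩
    · simp only [Bool.not_true, List.isEmpty_eq_false_iff, ne_eq]
      intro h0; rw [h0] at hhead; simp at hhead
    · rw [← PySem.Chars.isIn_iff_infix, ← PySem.Chars.exists_prefix_drop_iff_isIn]
      exact ⟨((0 : Int) + (k : Int)).toNat, List.isPrefixOf_iff_prefix.mp hpref⟩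
  · rintro ⟨q, hqmem, hne0, hinf⟩
    have hne : q.toList ≠ [] := by
      simpa only [Bool.not_true, List.isEmpty_eq_false_iff] using hne0
    rw [← PySem.Chars.isIn_iff_infix, ← PySem.Chars.exists_prefix_drop_iff_isIn] at hinf
    obtain ⟨j, hpre⟩ := hinf
    obtain ⟨c, rest, hq⟩ := List.exists_cons_of_ne_nil hne
    obtain ⟨t, ht⟩ := hpre
    have hjlt : j < f.toList.length := by
      by_contra hge
      have hnil : f.toList.drop j = [] := List.drop_eq_nil_of_le (by omega)
      rw [hnil] at ht
      have := List.append_eq_nil_iff.mp ht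
      rw [hq] at this; simp at this
    have hhead : f.toList[j]? = some c := by
      rw [← List.head?_drop, ← ht, hq]; rfl
    have hc : f.toList[j] = c := by
      rw [List.getElem?_eq_getElem hjlt] at hhead
      exact Option.some.inj hhead
    refine ⟨((0 : Int) + (j : Int), f.toList[j]), ⟨j, hjlt, rfl⟩, q, ⟨hqmem, ?_⟩, ?_⟩
    · simp [hq, hc]
    · have hj : (((0 : Int) + (j : Int)).toNat) = j := by omega
      rw [hj]
      exact List.isPrefixOf_iff_prefix.mpr ⟨t, ht⟩

-- the empty param "" matches every formula: splitting it off makes both sides agree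
theorem pv_any_split (params : List String) (f : String) :
    params.any (fun q => PySem.Str.isIn q f)
      = (params.contains "" || params.any (fun q => !q.toList.isEmpty && PySem.Str.isIn q f)) := by
  rw [Bool.eq_iff_iff]
  simp only [List.any_eq_true, Bool.or_eq_true, List.contains_iff_mem,
    Bool.and_eq_true, Bool.not_eq_eq_eq_not]
  constructor
  · rintro ⟨q, hm, hin⟩
    by_cases h0 : q = ""
    · exact Or.inl (h0 ▸ hm)
    · exact Or.inr ⟨q, hm, by simpa [String.toList_eq_nil_iff] using h0, hin⟩
  · rintro (h | ⟨q, hm, _, hin⟩)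
    · refine ⟨"", h, ?_⟩
      rw [PySem.Str.isIn_iff_infix]
      exact List.nil_infix
    · exact ⟨q, hm, hin⟩

-- ===== VERDICT (by name: the statement is the Claim_ definition above) =====
theorem remove_unused_exchanges_spec : Claim_equal_remove_unused_exchanges := by
  intro pd _ hPre
  unfold Spec_remove_unused_exchanges
  rw [pv_A_eq_filter pd hPre.1]
  unfold remove_unused_exchanges_alt
  by_cases hE : ((pd.filter (fun kv => !pvIsExch kv.1)).map Prod.fst).isEmpty
  · rw [if_pos hE]
    have h0 : (pd.filter (fun kv => !pvIsExch kv.1)).map Prod.fst = [] :=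
      List.isEmpty_iff.mp hE
    simp [h0]
  · rw [if_neg hE]
    symm
    apply List.filter_congr
    intro kv _
    rw [pv_used_eq_any, ← pv_any_split]
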